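-- pv_equiv track=rewrite | github.com/yudai-patronai/problembook | problems/dynamic/1d/chocolate/test_generator.py | solve
-- ===== SOURCE A (Python) =====
-- def solve(n):
--     if n % 2 != 0:
--         return 0
--
--     a = [0] * n
--     b = [0] * n
--
--     a[1] = 3
--     b[1] = 1
--
--     for i in range(2, n):
--         b[i] = a[i - 2] + b[i - 2]
--         a[i] = a[i - 2] * 2 + b[i - 2] + b[i]
--
--     return a[n - 1]
-- ===== SOURCE B (Python) =====
-- def solve(n):
--     if n % 2 != 0:
--         return 0
--     if n < 2:
--         raise ValueError("n must be a positive even integer")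
--
--     def mul(x, y):
--         return (x[0] * y[0] + x[1] * y[2],
--                 x[0] * y[1] + x[1] * y[3],
--                 x[2] * y[0] + x[3] * y[2],
--                 x[2] * y[1] + x[3] * y[3])
--
--     m = (3, 2, 1, 1)
--     r = (1, 0, 0, 1)
--     k = (n - 2) // 2
--     while k > 0:
--         if k & 1:
--             r = mul(r, m)
--         m = mul(m, m)
--         k >>= 1
--     return r[0] * 3 + r[1] * 1
-- ===== Notes on version B (the rewrite author's own statement) =====
-- stated objective: alternative
-- what changed: Replaced the O(n) array-filling linear recurrence with binary matrix exponentiation of [[3,2],[1,1]] applied to the initial state (3,1).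
import Mathlib
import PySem

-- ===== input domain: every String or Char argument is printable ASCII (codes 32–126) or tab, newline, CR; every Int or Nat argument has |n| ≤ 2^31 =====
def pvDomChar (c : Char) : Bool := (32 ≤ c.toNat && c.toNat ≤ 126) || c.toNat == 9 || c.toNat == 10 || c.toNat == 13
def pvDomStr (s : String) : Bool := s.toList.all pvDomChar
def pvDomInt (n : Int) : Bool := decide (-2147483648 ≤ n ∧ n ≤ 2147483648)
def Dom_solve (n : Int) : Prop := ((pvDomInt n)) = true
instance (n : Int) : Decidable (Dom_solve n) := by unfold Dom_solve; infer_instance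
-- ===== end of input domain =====

-- B computes the same linear recurrence by binary matrix exponentiation of [[3,2],[1,1]] instead of filling two length-n arrays (alternative algorithm).

-- ===== PORT A =====
-- Python lists are arrays; xs[i] / xs[i] = v ported as O(1) array access,
-- exact for 0 <= i < size — the only accesses A makes inside Pre_ (indices 1 and 2..n-1)
def pvGet (xs : Array Int) (i : Int) : Int := xs.getD i.toNat 0
def pvSet (xs : Array Int) (i : Int) (v : Int) : Array Int := xs.setIfInBounds i.toNat v

-- one loop iteration: b[i] = a[i-2] + b[i-2]; a[i] = a[i-2]*2 + b[i-2] + b[i]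
def solveStep (st : Array Int × Array Int) (i : Int) : Array Int × Array Int :=
  let a := st.1
  let b := st.2
  let b := pvSet b i (pvGet a (i - 2) + pvGet b (i - 2))
  let a := pvSet a i (pvGet a (i - 2) * 2 + pvGet b (i - 2) + pvGet b i)
  (a, b)

def solve (n : Int) : Int :=
  if PySem.Int.mod n 2 ≠ 0 then 0
  else
    -- [0] * n (empty for n ≤ 0, exactly as Int.toNat clamps)
    let a := Array.replicate n.toNat (0 : Int)
    let b := Array.replicate n.toNat (0 : Int)
    let a := pvSet a 1 3
    let b := pvSet b 1 1
    let ab := (PySem.List.pyRange 2 n 1).foldl solveStep (a, b)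
    pvGet ab.1 (n - 1)

-- ===== PORT B =====
-- 2x2 integer matrix as a flat row-major 4-tuple; mul is Source B's mul
def pvMul : (Int × Int × Int × Int) → (Int × Int × Int × Int) → (Int × Int × Int × Int)
  | (a, b, c, d), (e, f, g, h) => (a*e + b*g, a*f + b*h, c*e + d*g, c*f + d*h)

-- the Python `while k > 0:` loop; structurally recursive on a fuel that only guards
-- termination (fuel = k always suffices since k halves each round)
def pvPowLoop (fuel : Nat) (r m : Int × Int × Int × Int) (k : Nat) : Int × Int × Int × Int :=
  match fuel with
  | 0 => r
  | fuel + 1 =>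
      if k = 0 then r
      else pvPowLoop fuel (if k % 2 = 1 then pvMul r m else r) (pvMul m m) (k / 2)

def solve_alt (n : Int) : Int :=
  if PySem.Int.mod n 2 ≠ 0 then 0
  else if n < 2 then 0  -- Source B raises ValueError here; outside Pre_solve, value unclaimed
  else
    let k := ((n - 2) / 2).toNat  -- (n-2)//2, n ≥ 2 so Euclidean = floor division
    let r := pvPowLoop k (1, 0, 0, 1) (3, 2, 1, 1) k
    r.1 * 3 + r.2.1 * 1

-- ===== PRECONDITION & SPEC =====
-- Pre_ excludes even n ≤ 0: A raises IndexError there (a[1] = 3 on a too-short list), B raises ValueError.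
def Pre_solve (n : Int) : Prop := PySem.Int.mod n 2 ≠ 0 ∨ 2 ≤ n
instance (n : Int) : Decidable (Pre_solve n) := by unfold Pre_solve; infer_instance
def pvWitness_solve : Int := 10

def Spec_solve (n : Int) (out : Int) : Prop := out = solve_alt n
instance (n : Int) (out : Int) : Decidable (Spec_solve n out) := by unfold Spec_solve; infer_instance

-- ===== CLAIM (what is proved, stated in full; the proofs are below) =====
def Claim_equal_solve : Prop := ∀ (n : Int), Dom_solve n → Pre_solve n → Spec_solve n (solve n)

-- ===== LEMMAS AND PROOFS =====

-- the mathematical linear recurrence: (a[2k+1], b[2k+1]) of A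
def pvRef : Nat → Int × Int
  | 0 => (3, 1)
  | k + 1 => (3 * (pvRef k).1 + 2 * (pvRef k).2, (pvRef k).1 + (pvRef k).2)

-- mathematical matrix power
def pvPow (m : Int × Int × Int × Int) : Nat → Int × Int × Int × Int
  | 0 => (1, 0, 0, 1)
  | k + 1 => pvMul (pvPow m k) m

theorem pvMul_assoc (x y z : Int × Int × Int × Int) :
    pvMul (pvMul x y) z = pvMul x (pvMul y z) := by
  obtain ⟨a, b, c, d⟩ := x; obtain ⟨e, f, g, h⟩ := y; obtain ⟨i, j, k, l⟩ := z
  simp only [pvMul, Prod.mk.injEq]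
  refine ⟨by ring, by ring, by ring, by ring⟩

theorem pvMul_one (m : Int × Int × Int × Int) : pvMul m (1, 0, 0, 1) = m := by
  obtain ⟨a, b, c, d⟩ := m
  simp [pvMul]

theorem pvOne_mul (m : Int × Int × Int × Int) : pvMul (1, 0, 0, 1) m = m := by
  obtain ⟨a, b, c, d⟩ := m
  simp [pvMul]

theorem pvPow_succ_left (m : Int × Int × Int × Int) (k : Nat) :
    pvPow m (k + 1) = pvMul m (pvPow m k) := by
  induction k with
  | zero => simp [pvPow, pvMul_one, pvOne_mul]
  | succ k ih =>
      calc pvPow m (k + 2) = pvMul (pvPow m (k + 1)) m := rfl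
        _ = pvMul (pvMul m (pvPow m k)) m := by rw [ih]
        _ = pvMul m (pvMul (pvPow m k) m) := pvMul_assoc ..
        _ = pvMul m (pvPow m (k + 1)) := rfl

theorem pvPow_add (m : Int × Int × Int × Int) (j l : Nat) :
    pvPow m (j + l) = pvMul (pvPow m j) (pvPow m l) := by
  induction l with
  | zero => simp [pvPow, pvMul_one]
  | succ l ih => rw [← Nat.add_assoc, pvPow, pvPow, ih, pvMul_assoc]

theorem pvPow_two (m : Int × Int × Int × Int) : pvPow m 2 = pvMul m m := by
  simp [pvPow, pvOne_mul]

theorem pvPow_sq (m : Int × Int × Int × Int) (k : Nat) :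
    pvPow (pvMul m m) k = pvPow m (2 * k) := by
  induction k with
  | zero => rfl
  | succ k ih =>
      rw [pvPow, ih, Nat.mul_succ, pvPow_add, pvPow_two]

theorem pvPowLoop_eq (fuel : Nat) : ∀ (k : Nat) (r m : Int × Int × Int × Int), k ≤ fuel →
    pvPowLoop fuel r m k = pvMul r (pvPow m k) := by
  induction fuel with
  | zero =>
      intro k r m hk
      interval_cases k
      simp [pvPowLoop, pvPow, pvMul_one]
  | succ fuel ih =>
      intro k r m hk
      rw [pvPowLoop]
      by_cases h0 : k = 0
      · simp [h0, pvPow, pvMul_one]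
      · rw [if_neg h0, ih (k / 2) _ _ (by omega), pvPow_sq]
        by_cases hodd : k % 2 = 1
        · rw [if_pos hodd]
          have hk2 : 2 * (k / 2) + 1 = k := by omega
          calc pvMul (pvMul r m) (pvPow m (2 * (k / 2)))
              = pvMul r (pvMul m (pvPow m (2 * (k / 2)))) := pvMul_assoc ..
            _ = pvMul r (pvPow m (2 * (k / 2) + 1)) := by rw [pvPow_succ_left]
            _ = pvMul r (pvPow m k) := by rw [hk2]
        · rw [if_neg hodd]
          have hk2 : 2 * (k / 2) = k := by omega
          rw [hk2]

-- the matrix power applied to the initial vector (3, 1) follows pvRef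
theorem pvPow_apply (k : Nat) :
    (pvPow (3, 2, 1, 1) k).1 * 3 + (pvPow (3, 2, 1, 1) k).2.1 = (pvRef k).1 ∧
    (pvPow (3, 2, 1, 1) k).2.2.1 * 3 + (pvPow (3, 2, 1, 1) k).2.2.2 = (pvRef k).2 := by
  induction k with
  | zero => simp [pvPow, pvRef]
  | succ k ih =>
      rw [pvPow_succ_left]
      rcases hP : pvPow (3, 2, 1, 1) k with ⟨a, b, c, d⟩
      rw [hP] at ih
      obtain ⟨ih1, ih2⟩ := ih
      simp only [pvMul, pvRef]
      constructor <;> simp_all <;> linarith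

theorem solve_alt_even (n : Int) (h : PySem.Int.mod n 2 = 0) (h2 : 2 ≤ n) :
    solve_alt n = (pvRef (((n - 2) / 2).toNat)).1 := by
  have hk := pvPowLoop_eq (((n - 2) / 2).toNat)
    (((n - 2) / 2).toNat) (1, 0, 0, 1) (3, 2, 1, 1) le_rfl
  have hlt : ¬ n < 2 := by omega
  simp only [solve_alt, h, ne_eq, not_true_eq_false, if_false, hlt, hk, pvOne_mul]
  have := pvPow_apply (((n - 2) / 2).toNat)
  omega

-- ===== A-side: the loop fills positions by pvAval / pvBval =====
def pvAval (m j : Nat) : Int :=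
  if j = 1 then 3 else if j % 2 = 1 ∧ j < m then (pvRef ((j - 1) / 2)).1 else 0
def pvBval (m j : Nat) : Int :=
  if j = 1 then 1 else if j % 2 = 1 ∧ j < m then (pvRef ((j - 1) / 2)).2 else 0

theorem pvAval_odd (m j : Nat) (hj : j % 2 = 1) (hjm : j < m) :
    pvAval m j = (pvRef ((j - 1) / 2)).1 := by
  unfold pvAval
  by_cases h1 : j = 1
  · subst h1; simp [pvRef]
  · simp [h1, hj, hjm]

theorem pvBval_odd (m j : Nat) (hj : j % 2 = 1) (hjm : j < m) :
    pvBval m j = (pvRef ((j - 1) / 2)).2 := by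
  unfold pvBval
  by_cases h1 : j = 1
  · subst h1; simp [pvRef]
  · simp [h1, hj, hjm]

theorem pvAval_even (m j : Nat) (hj : j % 2 = 0) : pvAval m j = 0 := by
  unfold pvAval
  have h1 : j ≠ 1 := by omega
  simp [h1, hj]

theorem pvBval_even (m j : Nat) (hj : j % 2 = 0) : pvBval m j = 0 := by
  unfold pvBval
  have h1 : j ≠ 1 := by omega
  simp [h1, hj]

theorem pvAval_mono (m j : Nat) (hj : j ≠ m) : pvAval m j = pvAval (m + 1) j := by
  have hlt : (j < m) ↔ (j < m + 1) := by omega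
  simp [pvAval, hlt]

theorem pvBval_mono (m j : Nat) (hj : j ≠ m) : pvBval m j = pvBval (m + 1) j := by
  have hlt : (j < m) ↔ (j < m + 1) := by omega
  simp [pvBval, hlt]

theorem pvBnew (m : Nat) (h2 : 2 ≤ m) :
    pvBval (m + 1) m = pvAval m (m - 2) + pvBval m (m - 2) := by
  by_cases hodd : m % 2 = 1
  · rw [pvBval_odd _ _ hodd (by omega), pvAval_odd _ _ (by omega) (by omega),
        pvBval_odd _ _ (by omega) (by omega)]
    have h : (m - 1) / 2 = (m - 2 - 1) / 2 + 1 := by omega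
    rw [h]
    simp [pvRef]
  · rw [pvBval_even _ _ (by omega), pvAval_even _ _ (by omega), pvBval_even _ _ (by omega)]
    ring

theorem pvAnew (m : Nat) (h2 : 2 ≤ m) :
    pvAval (m + 1) m = pvAval m (m - 2) * 2 + pvBval (m + 1) (m - 2) + pvBval (m + 1) m := by
  by_cases hodd : m % 2 = 1
  · rw [pvAval_odd _ _ hodd (by omega), pvAval_odd _ _ (by omega) (by omega),
        pvBval_odd _ _ (by omega) (by omega), pvBval_odd _ _ hodd (by omega)]
    have h : (m - 1) / 2 = (m - 2 - 1) / 2 + 1 := by omega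
    rw [h]
    simp only [pvRef]
    ring
  · rw [pvAval_even _ _ (by omega), pvAval_even _ _ (by omega),
        pvBval_even _ _ (by omega), pvBval_even _ _ (by omega)]
    ring

-- bridges between the array port and list-level reasoning
theorem pvGet_toArray (l : List Int) (k : Nat) : pvGet l.toArray ((k : Nat) : Int) = l.getD k 0 := by
  unfold pvGet
  rw [Int.toNat_natCast]
  unfold Array.getD List.getD
  by_cases h : k < l.length
  · simp [h]
  · simp [h]

theorem pvSet_toArray (l : List Int) (k : Nat) (v : Int) :
    pvSet l.toArray ((k : Nat) : Int) v = (l.set k v).toArray := by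
  unfold pvSet
  rw [Int.toNat_natCast]
  simp

-- reading an element of a range-map
theorem pvReadMap (f : Nat → Int) (N k : Nat) (hk : k < N) :
    pvGet ((List.range N).map f).toArray ((k : Nat) : Int) = f k := by
  rw [pvGet_toArray]
  simp [List.getD_eq_getElem?_getD, hk]

-- setting one element of a range-map
theorem pvSetMap (f g : Nat → Int) (N m : Nat) (v : Int) (hm : m < N)
    (hset : g m = v) (hagree : ∀ j, j ≠ m → f j = g j) :
    ((List.range N).map f).set m v = (List.range N).map g := by
  apply List.ext_getElem
  · simp
  · intro i h1 h2
    simp only [List.getElem_set, List.getElem_map, List.getElem_range]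
    by_cases hi : i = m
    · subst hi; simp [hset]
    · have hmi : ¬ (m = i) := fun h => hi h.symm
      simp [hmi, hagree i hi]

-- initial lists a[1]=3 / b[1]=1
theorem pvInitA (N : Nat) :
    pvSet (Array.replicate N (0 : Int)) 1 3 = ((List.range N).map (pvAval 2)).toArray := by
  rw [show Array.replicate N (0 : Int) = (List.replicate N (0 : Int)).toArray by simp,
      show (1 : Int) = ((1 : Nat) : Int) from rfl, pvSet_toArray]
  congr 1
  apply List.ext_getElem
  · simp
  · intro i h1 h2
    simp only [List.getElem_set, List.getElem_replicate, List.getElem_map, List.getElem_range]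
    unfold pvAval
    by_cases hi : i = 1
    · simp [hi]
    · have : ¬ (1 = i) := fun h => hi h.symm
      have : ¬ (i % 2 = 1 ∧ i < 2) := by omega
      simp_all

theorem pvInitB (N : Nat) :
    pvSet (Array.replicate N (0 : Int)) 1 1 = ((List.range N).map (pvBval 2)).toArray := by
  rw [show Array.replicate N (0 : Int) = (List.replicate N (0 : Int)).toArray by simp,
      show (1 : Int) = ((1 : Nat) : Int) from rfl, pvSet_toArray]
  congr 1
  apply List.ext_getElem
  · simp
  · intro i h1 h2
    simp only [List.getElem_set, List.getElem_replicate, List.getElem_map, List.getElem_range]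
    unfold pvBval
    by_cases hi : i = 1
    · simp [hi]
    · have : ¬ (1 = i) := fun h => hi h.symm
      have : ¬ (i % 2 = 1 ∧ i < 2) := by omega
      simp_all

-- one loop step transforms the model lists from stage m to stage m+1
theorem pvStep (N m : Nat) (h2 : 2 ≤ m) (hm : m < N) :
    solveStep (((List.range N).map (pvAval m)).toArray, ((List.range N).map (pvBval m)).toArray)
      ((m : Nat) : Int) =
    (((List.range N).map (pvAval (m + 1))).toArray,
     ((List.range N).map (pvBval (m + 1))).toArray) := by
  have hcast : ((m : Nat) : Int) - 2 = (((m - 2 : Nat)) : Int) := by omega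
  have hm2 : m - 2 < N := by omega
  have hgd : ∀ f : Nat → Int, ∀ k : Nat, k < N →
      ((List.range N).map f).getD k 0 = f k := by
    intro f k hk
    simp [List.getD_eq_getElem?_getD, hk]
  unfold solveStep
  simp only [hcast, pvSet_toArray, pvGet_toArray]
  rw [hgd _ _ hm2, hgd _ _ hm2]
  rw [pvSetMap (pvBval m) (pvBval (m + 1)) N m _ hm (by rw [pvBnew m h2])
      (fun j hj => pvBval_mono m j hj)]
  rw [hgd _ _ hm2, hgd _ _ hm]
  rw [pvSetMap (pvAval m) (pvAval (m + 1)) N m _ hm (by rw [pvAnew m h2])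
      (fun j hj => pvAval_mono m j hj)]

-- the whole loop up to bound m
theorem pvLoop (N : Nat) : ∀ (m : Nat), 2 ≤ m → m ≤ N →
    (PySem.List.pyRange 2 ((m : Nat) : Int) 1).foldl solveStep
      (((List.range N).map (pvAval 2)).toArray, ((List.range N).map (pvBval 2)).toArray) =
    (((List.range N).map (pvAval m)).toArray, ((List.range N).map (pvBval m)).toArray) := by
  intro m h2 hmN
  induction m, h2 using Nat.le_induction with
  | base =>
      rw [PySem.List.pyRange_one_eq_nil (by norm_num)]
      rfl
  | succ m h2 ih =>
      have hcast : (((m + 1 : Nat)) : Int) = ((m : Nat) : Int) + 1 := by push_cast; ring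
      rw [hcast, PySem.List.pyRange_one_succ_right (by exact_mod_cast h2),
          List.foldl_append, ih (by omega)]
      simp only [List.foldl_cons, List.foldl_nil]
      exact pvStep N m h2 (by omega)

theorem solve_even (n : Int) (h : PySem.Int.mod n 2 = 0) (h2 : 2 ≤ n) :
    solve n = (pvRef ((n.toNat - 2) / 2)).1 := by
  obtain ⟨N, rfl⟩ : ∃ N : Nat, n = (N : Int) := ⟨n.toNat, by omega⟩
  have h2N : 2 ≤ N := by exact_mod_cast h2
  simp only [solve, h, ne_eq, not_true_eq_false, if_false, pvInitA, pvInitB,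
    Int.toNat_natCast]
  rw [pvLoop N N h2N le_rfl]
  have hcast : ((N : Nat) : Int) - 1 = (((N - 1 : Nat)) : Int) := by omega
  have hmod : PySem.Int.mod ((N : Nat) : Int) 2 = ((N % 2 : Nat) : Int) :=
    PySem.Int.mod_natCast N 2
  have hNe : N % 2 = 0 := by omega
  rw [hcast, pvReadMap _ _ _ (by omega)]
  have hNodd : (N - 1) % 2 = 1 := by omega
  rw [pvAval_odd _ _ hNodd (by omega)]
  have : (N - 1 - 1) / 2 = (N - 2) / 2 := by omega
  rw [this]

-- ===== VERDICT (by name: the statement is the Claim_ definition above) =====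
theorem solve_spec : Claim_equal_solve := by
  intro n _ pre
  unfold Spec_solve
  by_cases h : PySem.Int.mod n 2 = 0
  · have h2 : 2 ≤ n := by
      rcases pre with hodd | h2
      · exact absurd h hodd
      · exact h2
    rw [solve_even n h h2, solve_alt_even n h h2]
    congr 2
    omega
  · rw [solve, if_pos h, solve_alt, if_pos h]
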